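-- pv_equiv track=rewrite | github.com/Thiago-Santos-SI/python-tst | final/sequencia/Q3.py | tem123plus
-- ===== SOURCE A (Python) =====
-- def tem123plus(li):
--     i1 = -1
--     tem1, tem2 = False, False
--     for i in range(len(li)):
--         if li[i] == 1:
--             tem1 = True
--             if i1 == -1:
--                 i1 = i
--         elif li[i] == 2 and tem1:
--             tem2 = True
--         elif li[i] == 3 and tem1 and tem2:
--             return i1
--
--     return -1
-- ===== SOURCE B (Python) =====
-- def tem123plus(li):
--     try:
--         i1 = li.index(1)
--         rest = li[i1 + 1:]
--         rest2 = rest[rest.index(2) + 1:]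
--     except ValueError:
--         return -1
--     return i1 if 3 in rest2 else -1
-- ===== Notes on version B (the rewrite author's own statement) =====
-- stated objective: simpler
-- what changed: Replaces the flag-driven single-pass state machine with three sequential searches: first index of 1, then first 2 in the suffix after it, then a membership test for 3 in the suffix after that 2.
import Mathlib
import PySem

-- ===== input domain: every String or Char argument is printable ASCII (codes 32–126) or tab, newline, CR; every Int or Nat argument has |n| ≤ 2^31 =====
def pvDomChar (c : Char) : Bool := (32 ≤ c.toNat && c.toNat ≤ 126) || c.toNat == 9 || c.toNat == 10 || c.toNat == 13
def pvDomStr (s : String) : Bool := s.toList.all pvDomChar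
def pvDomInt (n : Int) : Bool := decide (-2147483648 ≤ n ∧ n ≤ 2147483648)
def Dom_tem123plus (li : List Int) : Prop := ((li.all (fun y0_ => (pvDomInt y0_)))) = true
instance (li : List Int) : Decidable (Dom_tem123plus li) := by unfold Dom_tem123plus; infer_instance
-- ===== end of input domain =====

-- B replaces A's flag-driven single-pass state machine by three sequential searches
-- (first 1, first 2 after it, a 3 after that); objective: simpler.

-- ===== PORT A =====
-- A's 'for i in range(len(li))' with early return, as structural recursion over the
-- list carrying the index i and the state (i1, tem1, tem2).
def tem123plusLoop : List Int → Int → Int → Bool → Bool → Int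
  | [], _, _, _, _ => -1
  | x :: xs, i, i1, tem1, tem2 =>
    if x = 1 then
      tem123plusLoop xs (i + 1) (if i1 = -1 then i else i1) true tem2
    else if x = 2 ∧ tem1 = true then
      tem123plusLoop xs (i + 1) i1 tem1 true
    else if x = 3 ∧ tem1 = true ∧ tem2 = true then
      i1
    else
      tem123plusLoop xs (i + 1) i1 tem1 tem2

def tem123plus (li : List Int) : Int := tem123plusLoop li 0 (-1) false false

-- ===== PORT B =====
def tem123plus_alt (li : List Int) : Int :=
  match PySem.List.index? li 1 with
  | none => -1
  | some i1 =>
    let rest := PySem.List.slice li (some ((i1 : Int) + 1)) none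
    match PySem.List.index? rest 2 with
    | none => -1
    | some j =>
      let rest2 := PySem.List.slice rest (some ((j : Int) + 1)) none
      if 3 ∈ rest2 then (i1 : Int) else -1

-- ===== PRECONDITION & SPEC =====
def Spec_tem123plus (li : List Int) (out : Int) : Prop := out = tem123plus_alt li
instance (li : List Int) (out : Int) : Decidable (Spec_tem123plus li out) := by unfold Spec_tem123plus; infer_instance

-- ===== CLAIM (what is proved, stated in full; the proofs are below) =====
def Claim_equal_tem123plus : Prop := ∀ (li : List Int), Dom_tem123plus li → Spec_tem123plus li (tem123plus li)

-- ===== LEMMAS AND PROOFS =====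

-- Phase 3 (both flags set): A returns i1 at the first 3, else -1.
theorem loop_tt (xs : List Int) (i i1 : Int) (h : i1 ≠ -1) :
    tem123plusLoop xs i i1 true true = if 3 ∈ xs then i1 else -1 := by
  induction xs generalizing i with
  | nil => simp [tem123plusLoop]
  | cons x xs ih =>
    by_cases h1 : x = 1
    · subst h1
      simp [tem123plusLoop, h, ih (i + 1)]
    · by_cases h2 : x = 2
      · subst h2
        simp [tem123plusLoop, ih (i + 1)]
      · by_cases h3 : x = 3
        · subst h3
          simp [tem123plusLoop]
        · have h3' : ¬(3 : Int) = x := fun hx => h3 hx.symm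
          simp [tem123plusLoop, h1, h2, h3, h3', ih (i + 1)]

-- Phase 2 (tem1 set): A returns i1 iff a 2 is found and a 3 follows it.
theorem loop_tf (xs : List Int) (i i1 : Int) (h : i1 ≠ -1) :
    tem123plusLoop xs i i1 true false =
      match PySem.List.index? xs 2 with
      | none => -1
      | some j => if 3 ∈ xs.drop (j + 1) then i1 else -1 := by
  induction xs generalizing i with
  | nil => simp [tem123plusLoop, PySem.List.index?]
  | cons x xs ih =>
    by_cases h2 : x = 2
    · subst h2
      have : tem123plusLoop (2 :: xs) i i1 true false
          = tem123plusLoop xs (i + 1) i1 true true := by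
        simp [tem123plusLoop]
      rw [this, loop_tt xs (i + 1) i1 h, PySem.List.index?_cons_self]
      simp
    · have hrec : tem123plusLoop (x :: xs) i i1 true false
          = tem123plusLoop xs (i + 1) i1 true false := by
        by_cases h1 : x = 1
        · subst h1; simp [tem123plusLoop, h]
        · simp [tem123plusLoop, h1, h2]
      rw [hrec, ih (i + 1), PySem.List.index?_cons_of_ne xs h2]
      cases hidx : PySem.List.index? xs 2 with
      | none => simp
      | some j => simp [List.drop_succ_cons]

-- Phase 1 (initial state): A returns the first 1's index iff a 2 follows it and a 3 follows that 2.
theorem loop_ff (xs : List Int) (i : Int) (hi : 0 ≤ i) :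
    tem123plusLoop xs i (-1) false false =
      match PySem.List.index? xs 1 with
      | none => -1
      | some k =>
        match PySem.List.index? (xs.drop (k + 1)) 2 with
        | none => -1
        | some j => if 3 ∈ (xs.drop (k + 1)).drop (j + 1) then i + k else -1 := by
  induction xs generalizing i with
  | nil => simp [tem123plusLoop, PySem.List.index?]
  | cons x xs ih =>
    by_cases h1 : x = 1
    · subst h1
      have hstep : tem123plusLoop (1 :: xs) i (-1) false false
          = tem123plusLoop xs (i + 1) i true false := by
        simp [tem123plusLoop]
      rw [hstep, loop_tf xs (i + 1) i (by omega), PySem.List.index?_cons_self]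
      simp
    · have hstep : tem123plusLoop (x :: xs) i (-1) false false
          = tem123plusLoop xs (i + 1) (-1) false false := by
        simp [tem123plusLoop, h1]
      rw [hstep, ih (i + 1) (by omega),
        PySem.List.index?_cons_of_ne xs h1]
      cases hidx : PySem.List.index? xs 1 with
      | none => simp
      | some k =>
        simp only [Option.map_some, List.drop_succ_cons]
        cases PySem.List.index? (xs.drop (k + 1)) 2 with
        | none => simp
        | some j =>
          have : i + 1 + (k : Int) = i + ((k : Int) + 1) := by ring
          simp [this]

-- The suffix slices in B are drops.
theorem slice_succ_drop (xs : List Int) (n : Nat) :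
    PySem.List.slice xs (some ((n : Int) + 1)) none = xs.drop (n + 1) := by
  have : ((n : Int) + 1) = ((n + 1 : Nat) : Int) := by push_cast; ring
  rw [this, PySem.List.slice_from_natCast]

-- ===== VERDICT (by name: the statement is the Claim_ definition above) =====
theorem tem123plus_spec : Claim_equal_tem123plus := by
  intro li _
  unfold Spec_tem123plus tem123plus tem123plus_alt
  rw [loop_ff li 0 le_rfl]
  cases PySem.List.index? li 1 with
  | none => rfl
  | some k =>
    simp only [slice_succ_drop]
    cases PySem.List.index? (li.drop (k + 1)) 2 with
    | none => rfl
    | some j => simp
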